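-- pv_equiv track=rewrite | github.com/SKywa1kerr/BioAgent | core/alignment.py | detect_frameshift
-- ===== SOURCE A (Python) =====
-- def ref2pos_to_refpos(ref2_pos_0based: int, ref_len: int) -> int:
--     """0-based ref2 position -> 1-based original ref position (circular)."""
--     return (ref2_pos_0based % ref_len) + 1
--
-- def detect_frameshift(ref_g: str, qry_g: str, ref2_start: int,
--                       ref_len: int, cds_start: int, cds_end: int) -> bool:
--     """Check if there are indels in the CDS region that are NOT multiples of 3."""
--     if cds_start is None or cds_end is None:
--         return False
--
--     cds_ins = 0
--     cds_del = 0
--     ref2_cursor = ref2_start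
--     last_refpos = None
--
--     for a, b in zip(ref_g, qry_g):
--         if a != "-":
--             refpos = ref2pos_to_refpos(ref2_cursor, ref_len)
--             last_refpos = refpos
--             ref2_cursor += 1
--             if cds_start <= refpos <= cds_end and b == "-":
--                 cds_del += 1
--         else:
--             if b != "-" and last_refpos is not None:
--                 if cds_start <= last_refpos <= cds_end:
--                     cds_ins += 1
--
--     net_indel = abs(cds_ins - cds_del)
--     if (cds_ins + cds_del) > 0 and (net_indel % 3 != 0):
--         return True
--     return False
-- ===== SOURCE B (Python) =====
-- def _col_refpos(pairs, ref2_start, ref_len):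
--     """Pass 1: for each alignment column, the 1-based circular ref position it
--     falls on (carried position for ref-gap columns; None before the first ref
--     char), plus whether the column consumes a ref base."""
--     ann = []
--     cur = ref2_start
--     last = None
--     for a, _ in pairs:
--         if a == "-":
--             ann.append((last, False))
--         else:
--             last = (cur % ref_len) + 1
--             cur += 1
--             ann.append((last, True))
--     return ann
--
-- def detect_frameshift(ref_g, qry_g, ref2_start, ref_len, cds_start, cds_end):
--     if cds_start is None or cds_end is None:
--         return False
--     pairs = list(zip(ref_g, qry_g))
--     ann = _col_refpos(pairs, ref2_start, ref_len)
--     in_cds = lambda p: p is not None and cds_start <= p <= cds_end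
--     cds_del = sum(1 for (pos, isref), (_, b) in zip(ann, pairs)
--                   if isref and b == "-" and in_cds(pos))
--     cds_ins = sum(1 for (pos, isref), (_, b) in zip(ann, pairs)
--                   if not isref and b != "-" and in_cds(pos))
--     return (cds_ins + cds_del) > 0 and abs(cds_ins - cds_del) % 3 != 0
-- ===== Notes on version B (the rewrite author's own statement) =====
-- stated objective: alternative
-- what changed: Replaces A's single stateful loop with interleaved counter updates by a two-pass decomposition: pass 1 annotates each column with its effective circular ref position and whether it consumes a ref base, pass 2 counts CDS deletions and insertions as two stateless filtered counts over the annotated columns.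
import Mathlib
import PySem

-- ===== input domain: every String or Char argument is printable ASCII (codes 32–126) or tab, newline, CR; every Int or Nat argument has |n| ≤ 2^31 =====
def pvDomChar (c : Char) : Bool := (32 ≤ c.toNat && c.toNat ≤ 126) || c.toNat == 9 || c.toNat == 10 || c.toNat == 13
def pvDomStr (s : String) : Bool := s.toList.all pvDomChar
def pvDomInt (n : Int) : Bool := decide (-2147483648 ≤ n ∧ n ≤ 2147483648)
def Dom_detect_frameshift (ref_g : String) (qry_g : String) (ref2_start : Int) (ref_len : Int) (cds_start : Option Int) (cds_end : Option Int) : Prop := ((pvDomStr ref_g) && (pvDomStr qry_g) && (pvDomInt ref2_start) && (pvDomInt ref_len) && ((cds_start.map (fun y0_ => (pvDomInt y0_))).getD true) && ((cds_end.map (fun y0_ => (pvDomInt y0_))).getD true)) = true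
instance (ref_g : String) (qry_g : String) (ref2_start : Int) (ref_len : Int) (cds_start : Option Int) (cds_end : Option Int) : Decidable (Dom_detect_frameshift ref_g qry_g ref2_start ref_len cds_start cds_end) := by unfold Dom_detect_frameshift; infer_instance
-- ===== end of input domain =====

-- B replaces A's single stateful counting loop with a two-pass decomposition
-- (annotate each column with its effective ref position, then two filtered counts);
-- objective: alternative (same cost, stateless second pass).

-- ===== PORT A =====
-- helper ref2pos_to_refpos from the Python module
def ref2pos_to_refpos (ref2_pos_0based : Int) (ref_len : Int) : Int :=
  PySem.Int.mod ref2_pos_0based ref_len + 1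

-- one iteration of A's loop; state = (cds_ins, cds_del, ref2_cursor, last_refpos)
def dfStepA (ref_len : Int) (cs ce : Int) (st : Int × Int × Int × Option Int)
    (p : Char × Char) : Int × Int × Int × Option Int :=
  let (ins, del, cur, last) := st
  if p.1 ≠ '-' then
    let refpos := ref2pos_to_refpos cur ref_len
    let del' := if cs ≤ refpos ∧ refpos ≤ ce ∧ p.2 = '-' then del + 1 else del
    (ins, del', cur + 1, some refpos)
  else
    if p.2 ≠ '-' then
      match last with
      | some lp => if cs ≤ lp ∧ lp ≤ ce then (ins + 1, del, cur, last) else (ins, del, cur, last)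
      | none => (ins, del, cur, last)
    else (ins, del, cur, last)

def detect_frameshift (ref_g : String) (qry_g : String) (ref2_start : Int) (ref_len : Int) (cds_start : Option Int) (cds_end : Option Int) : Bool :=
  match cds_start, cds_end with
  | some cs, some ce =>
    let res := (ref_g.toList.zip qry_g.toList).foldl (dfStepA ref_len cs ce)
                 (0, 0, ref2_start, none)
    let ins := res.1
    let del := res.2.1
    let net_indel := |ins - del|
    if ins + del > 0 ∧ PySem.Int.mod net_indel 3 ≠ 0 then true else false
  | _, _ => false

-- ===== PORT B =====
-- pass 1 (_col_refpos in Source B): per column its effective ref position and a ref-base flag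
def dfAnnotate (ref_len : Int) : List (Char × Char) → Int → Option Int → List (Option Int × Bool)
  | [], _, _ => []
  | (a, _) :: rest, cur, last =>
    if a = '-' then (last, false) :: dfAnnotate ref_len rest cur last
    else
      let p := PySem.Int.mod cur ref_len + 1
      (some p, true) :: dfAnnotate ref_len rest (cur + 1) (some p)

def dfInCds (cs ce : Int) : Option Int → Bool
  | some v => decide (cs ≤ v ∧ v ≤ ce)
  | none => false

def detect_frameshift_alt (ref_g : String) (qry_g : String) (ref2_start : Int) (ref_len : Int) (cds_start : Option Int) (cds_end : Option Int) : Bool :=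
  match cds_start with
  | none => false
  | some cs =>
  match cds_end with
  | none => false
  | some ce =>
    let pairs := ref_g.toList.zip qry_g.toList
    let ann := dfAnnotate ref_len pairs ref2_start none
    let cds_del : Int := ((ann.zip pairs).filter
        (fun x => x.1.2 && x.2.2 == '-' && dfInCds cs ce x.1.1)).length
    let cds_ins : Int := ((ann.zip pairs).filter
        (fun x => !x.1.2 && x.2.2 != '-' && dfInCds cs ce x.1.1)).length
    decide (cds_ins + cds_del > 0) && decide (PySem.Int.mod |cds_ins - cds_del| 3 ≠ 0)

-- ===== PRECONDITION & SPEC =====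
-- Pre_ excludes exactly the inputs where the Python programs raise ZeroDivisionError:
-- both CDS bounds given, ref_len = 0, and some aligned column carries a non-gap ref char.
def Pre_detect_frameshift (ref_g : String) (qry_g : String) (ref2_start : Int) (ref_len : Int) (cds_start : Option Int) (cds_end : Option Int) : Prop :=
  (cds_start ≠ none ∧ cds_end ≠ none ∧
    ((ref_g.toList.take (min ref_g.toList.length qry_g.toList.length)).any (fun c => c ≠ '-')) = true) →
  ref_len ≠ 0
instance (ref_g : String) (qry_g : String) (ref2_start : Int) (ref_len : Int) (cds_start : Option Int) (cds_end : Option Int) : Decidable (Pre_detect_frameshift ref_g qry_g ref2_start ref_len cds_start cds_end) := by unfold Pre_detect_frameshift; infer_instance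

def pvWitness_detect_frameshift : String × String × Int × Int × Option Int × Option Int :=
  ("A-", "-A", 0, 1, some 1, some 3)

def Spec_detect_frameshift (ref_g : String) (qry_g : String) (ref2_start : Int) (ref_len : Int) (cds_start : Option Int) (cds_end : Option Int) (out : Bool) : Prop := out = detect_frameshift_alt ref_g qry_g ref2_start ref_len cds_start cds_end
instance (ref_g : String) (qry_g : String) (ref2_start : Int) (ref_len : Int) (cds_start : Option Int) (cds_end : Option Int) (out : Bool) : Decidable (Spec_detect_frameshift ref_g qry_g ref2_start ref_len cds_start cds_end out) := by unfold Spec_detect_frameshift; infer_instance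

-- ===== CLAIM (what is proved, stated in full; the proofs are below) =====
def Claim_equal_detect_frameshift : Prop := ∀ (ref_g : String) (qry_g : String) (ref2_start : Int) (ref_len : Int) (cds_start : Option Int) (cds_end : Option Int), Dom_detect_frameshift ref_g qry_g ref2_start ref_len cds_start cds_end → Pre_detect_frameshift ref_g qry_g ref2_start ref_len cds_start cds_end → Spec_detect_frameshift ref_g qry_g ref2_start ref_len cds_start cds_end (detect_frameshift ref_g qry_g ref2_start ref_len cds_start cds_end)

-- ===== LEMMAS AND PROOFS =====

-- A's running cds_ins equals B's filtered insertion count over the annotated columns.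
theorem dfFold_ins (ref_len cs ce : Int) :
    ∀ (pairs : List (Char × Char)) (ins del cur : Int) (last : Option Int),
      (pairs.foldl (dfStepA ref_len cs ce) (ins, del, cur, last)).1 =
        ins + (((dfAnnotate ref_len pairs cur last).zip pairs).filter
            (fun x => !x.1.2 && x.2.2 != '-' && dfInCds cs ce x.1.1)).length := by
  intro pairs
  induction pairs with
  | nil => intro ins del cur last; simp [dfAnnotate]
  | cons p rest ih =>
    intro ins del cur last
    obtain ⟨a, b⟩ := p
    simp only [List.foldl_cons]
    by_cases ha : a = '-'
    · by_cases hb : b = '-'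
      · rw [show dfStepA ref_len cs ce (ins, del, cur, last) (a, b) = (ins, del, cur, last)
            from by simp [dfStepA, ha, hb]]
        rw [ih]
        simp [dfAnnotate, ha, hb]
      · cases last with
        | none =>
          rw [show dfStepA ref_len cs ce (ins, del, cur, none) (a, b) = (ins, del, cur, none)
              from by simp [dfStepA, ha, hb]]
          rw [ih]
          simp [dfAnnotate, ha, dfInCds]
        | some lp =>
          by_cases hc : cs ≤ lp ∧ lp ≤ ce
          · rw [show dfStepA ref_len cs ce (ins, del, cur, some lp) (a, b)
                  = (ins + 1, del, cur, some lp) from by simp [dfStepA, ha, hb, hc]]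
            rw [ih]
            simp only [dfAnnotate, ha, if_true, List.zip_cons_cons]
            rw [List.filter_cons_of_pos (by simp [dfInCds, hb, hc.1, hc.2])]
            simp only [List.length_cons]
            push_cast
            ring
          · rw [show dfStepA ref_len cs ce (ins, del, cur, some lp) (a, b)
                  = (ins, del, cur, some lp) from by simp [dfStepA, ha, hb, hc]]
            rw [ih]
            simp only [dfAnnotate, ha, if_true, List.zip_cons_cons]
            rw [List.filter_cons_of_neg (by simp [dfInCds]; omega)]
    · rw [show dfStepA ref_len cs ce (ins, del, cur, last) (a, b)
            = (ins, (if cs ≤ ref2pos_to_refpos cur ref_len ∧ ref2pos_to_refpos cur ref_len ≤ ce ∧ b = '-' then del + 1 else del),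
               cur + 1, some (ref2pos_to_refpos cur ref_len)) from by simp [dfStepA, ha]]
      rw [ih]
      simp only [dfAnnotate, ha, if_false, List.zip_cons_cons, ref2pos_to_refpos]
      rw [List.filter_cons_of_neg (by simp)]

-- A's running cds_del equals B's filtered deletion count over the annotated columns.
theorem dfFold_del (ref_len cs ce : Int) :
    ∀ (pairs : List (Char × Char)) (ins del cur : Int) (last : Option Int),
      (pairs.foldl (dfStepA ref_len cs ce) (ins, del, cur, last)).2.1 =
        del + (((dfAnnotate ref_len pairs cur last).zip pairs).filter
            (fun x => x.1.2 && x.2.2 == '-' && dfInCds cs ce x.1.1)).length := by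
  intro pairs
  induction pairs with
  | nil => intro ins del cur last; simp [dfAnnotate]
  | cons p rest ih =>
    intro ins del cur last
    obtain ⟨a, b⟩ := p
    simp only [List.foldl_cons]
    by_cases ha : a = '-'
    · have hstep : ∀ ins' : Int, dfStepA ref_len cs ce (ins', del, cur, last) (a, b)
          = ((dfStepA ref_len cs ce (ins', del, cur, last) (a, b)).1, del, cur, last) := by
        intro ins'
        cases last <;> simp [dfStepA, ha] <;> split_ifs <;> rfl
      rw [hstep ins, ih]
      simp only [dfAnnotate, ha, if_true, List.zip_cons_cons]
      rw [List.filter_cons_of_neg (by simp)]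
    · rw [show dfStepA ref_len cs ce (ins, del, cur, last) (a, b)
            = (ins, (if cs ≤ ref2pos_to_refpos cur ref_len ∧ ref2pos_to_refpos cur ref_len ≤ ce ∧ b = '-' then del + 1 else del),
               cur + 1, some (ref2pos_to_refpos cur ref_len)) from by simp [dfStepA, ha]]
      rw [ih]
      simp only [dfAnnotate, ha, if_false, List.zip_cons_cons, ref2pos_to_refpos]
      by_cases hd : cs ≤ PySem.Int.mod cur ref_len + 1 ∧ PySem.Int.mod cur ref_len + 1 ≤ ce ∧ b = '-'
      · rw [if_pos (by simpa [ref2pos_to_refpos] using hd)]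
        rw [List.filter_cons_of_pos (by simp [dfInCds, hd.1, hd.2.1, hd.2.2])]
        simp only [List.length_cons]
        push_cast
        ring
      · rw [if_neg (by simpa [ref2pos_to_refpos] using hd)]
        rw [List.filter_cons_of_neg (by
          simp [dfInCds]
          intro hb' h1
          by_contra h2
          exact hd ⟨h1, by omega, hb'⟩)]

-- ===== VERDICT (by name: the statement is the Claim_ definition above) =====
theorem detect_frameshift_spec : Claim_equal_detect_frameshift := by
  intro ref_g qry_g ref2_start ref_len cds_start cds_end _ _
  unfold Spec_detect_frameshift detect_frameshift detect_frameshift_alt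
  cases cds_start with
  | none => rfl
  | some cs =>
    cases cds_end with
    | none => rfl
    | some ce =>
      simp only
      rw [dfFold_ins ref_len cs ce (ref_g.toList.zip qry_g.toList) 0 0 ref2_start none,
          dfFold_del ref_len cs ce (ref_g.toList.zip qry_g.toList) 0 0 ref2_start none]
      simp only [zero_add]
      by_cases h1 : ((((dfAnnotate ref_len (ref_g.toList.zip qry_g.toList) ref2_start none).zip
            (ref_g.toList.zip qry_g.toList)).filter
            (fun x => !x.1.2 && x.2.2 != '-' && dfInCds cs ce x.1.1)).length : Int) +
          ((((dfAnnotate ref_len (ref_g.toList.zip qry_g.toList) ref2_start none).zip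
            (ref_g.toList.zip qry_g.toList)).filter
            (fun x => x.1.2 && x.2.2 == '-' && dfInCds cs ce x.1.1)).length : Int) > 0 <;>
        by_cases h2 : PySem.Int.mod
          |((((dfAnnotate ref_len (ref_g.toList.zip qry_g.toList) ref2_start none).zip
            (ref_g.toList.zip qry_g.toList)).filter
            (fun x => !x.1.2 && x.2.2 != '-' && dfInCds cs ce x.1.1)).length : Int) -
          ((((dfAnnotate ref_len (ref_g.toList.zip qry_g.toList) ref2_start none).zip
            (ref_g.toList.zip qry_g.toList)).filter
            (fun x => x.1.2 && x.2.2 == '-' && dfInCds cs ce x.1.1)).length : Int)| 3 ≠ 0 <;>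
        simp [h1, h2]
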